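-- pv_equiv track=rewrite | github.com/PierpaoloSpadafora/Crystal_Rush-IA-Agent | Crystal-Rush-ASP/src/main/java/it/unical/ai/XFORZA/separator.py | parse_input_string
-- ===== SOURCE A (Python) =====
-- def parse_input_string(input_string):
--     lines = input_string.split('\n')
--     categorized_preds = {
--         'row': [],
--         'col': [],
--         'cell': [],
--         'action': [],
--         'item': [],
--         'robot': [],
--         'objectiveIs': [],
--         'costOfNextMove': [],
--         'teamColor': [],
--         'objective': [],
--         'itemAvailable': [],
--         'reachingCost': [],
--         'allyMine': [],
--         'allyRadar': [],
--         'enemyRadar': [],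
--         'enemyMine': [],
--         'goodRadarPlace': [],
--         'goodMinePlace': [],
--         'emptyGem': []  # Aggiunto
--     }
--
--     for line in lines:
--         if line.strip():
--             predicates = line.split('. ')
--             for pred in predicates:
--                 pred = pred.strip()
--                 if pred.startswith('row('):
--                     categorized_preds['row'].append(pred)
--                 elif pred.startswith('col('):
--                     categorized_preds['col'].append(pred)
--                 elif pred.startswith('cell'):
--                     categorized_preds['cell'].append(pred)
--                 elif pred.startswith('action'):
--                     categorized_preds['action'].append(pred)
--                 elif pred.startswith('item('):
--                     categorized_preds['item'].append(pred)
--                 elif pred.startswith('robot'):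
--                     categorized_preds['robot'].append(pred)
--                 elif pred.startswith('objectiveIs'):
--                     categorized_preds['objectiveIs'].append(pred)
--                 elif pred.startswith('costOfNextMove'):
--                     categorized_preds['costOfNextMove'].append(pred)
--                 elif pred.startswith('teamColor'):
--                     categorized_preds['teamColor'].append(pred)
--                 elif pred.startswith('objective('):
--                     categorized_preds['objective'].append(pred)
--                 elif pred.startswith('itemAvailable'):
--                     categorized_preds['itemAvailable'].append(pred)
--                 elif pred.startswith('reachingCost'):
--                     categorized_preds['reachingCost'].append(pred)
--                 elif pred.startswith('allyMine'):
--                     categorized_preds['allyMine'].append(pred)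
--                 elif pred.startswith('allyRadar'):
--                     categorized_preds['allyRadar'].append(pred)
--                 elif pred.startswith('enemyRadar'):
--                     categorized_preds['enemyRadar'].append(pred)
--                 elif pred.startswith('enemyMine'):
--                     categorized_preds['enemyMine'].append(pred)
--                 elif pred.startswith('goodRadarPlace'):
--                     categorized_preds['goodRadarPlace'].append(pred)
--                 elif pred.startswith('goodMinePlace'):
--                     categorized_preds['goodMinePlace'].append(pred)
--                 elif pred.startswith('emptyGem'):  # Aggiunto
--                     categorized_preds['emptyGem'].append(pred)
--
--     sorted_output = []
--     for key in ['row', 'col', 'cell', 'action', 'item', 'robot', 'objectiveIs',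
--                 'costOfNextMove', 'teamColor', 'objective', 'itemAvailable',
--                 'reachingCost', 'allyMine', 'allyRadar', 'enemyRadar', 'enemyMine', 'goodRadarPlace', 'goodMinePlace', 'emptyGem']:  # Aggiunto 'emptyGem'
--         if categorized_preds[key]:
--             sorted_output.append('. '.join(categorized_preds[key]) + '.')
--
--     output_string = '\n'.join(sorted_output) + '\n'
--     output_string = output_string.replace('..\n', '.\n')
--     return output_string
-- ===== SOURCE B (Python) =====
-- PREFIXES = ['row(', 'col(', 'cell', 'action', 'item(', 'robot', 'objectiveIs',
--             'costOfNextMove', 'teamColor', 'objective(', 'itemAvailable',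
--             'reachingCost', 'allyMine', 'allyRadar', 'enemyRadar', 'enemyMine',
--             'goodRadarPlace', 'goodMinePlace', 'emptyGem']
--
--
-- def _classify(pred):
--     for i, pre in enumerate(PREFIXES):
--         if pred.startswith(pre):
--             return i
--     return None
--
--
-- def parse_input_string(input_string):
--     tagged = [(_classify(p.strip()), p.strip())
--               for line in input_string.split('\n') if line.strip()
--               for p in line.split('. ')]
--     parts = []
--     for i in range(len(PREFIXES)):
--         group = [p for (j, p) in tagged if j == i]
--         if group:
--             parts.append('. '.join(group) + '.')
--     out = '\n'.join(parts) + '\n'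
--     return out.replace('..\n', '.\n')
-- ===== Notes on version B (the rewrite author's own statement) =====
-- stated objective: simpler
-- what changed: Replaced the 19-way elif ladder appending into a dict of buckets by a single ordered prefix table: each stripped predicate is classified once to a category index in a flat tagged list, and the output groups are obtained by one filter per category index, with the same join/replace formatting.
import Mathlib
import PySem

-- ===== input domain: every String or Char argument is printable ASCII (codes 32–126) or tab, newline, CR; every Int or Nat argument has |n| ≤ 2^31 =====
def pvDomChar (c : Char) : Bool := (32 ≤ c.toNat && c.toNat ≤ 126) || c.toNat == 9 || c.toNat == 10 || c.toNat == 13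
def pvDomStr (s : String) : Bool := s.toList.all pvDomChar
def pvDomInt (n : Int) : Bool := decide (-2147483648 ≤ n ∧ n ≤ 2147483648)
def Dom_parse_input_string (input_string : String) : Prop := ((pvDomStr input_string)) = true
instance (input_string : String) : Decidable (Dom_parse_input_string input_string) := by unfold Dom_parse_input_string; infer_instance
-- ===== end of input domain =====

-- B replaces A's 19-branch elif ladder over a dict of buckets by a single ordered
-- prefix table (classify once to an index, then one filter per category); same output.

-- ===== PORT A =====
def pvD0 : PySem.Dict String (List String) :=
  PySem.Dict.ofList [("row", []), ("col", []), ("cell", []), ("action", []), ("item", []),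
    ("robot", []), ("objectiveIs", []), ("costOfNextMove", []), ("teamColor", []),
    ("objective", []), ("itemAvailable", []), ("reachingCost", []), ("allyMine", []),
    ("allyRadar", []), ("enemyRadar", []), ("enemyMine", []), ("goodRadarPlace", []),
    ("goodMinePlace", []), ("emptyGem", [])]

def pvKeys : List String :=
  ["row", "col", "cell", "action", "item", "robot", "objectiveIs", "costOfNextMove",
   "teamColor", "objective", "itemAvailable", "reachingCost", "allyMine", "allyRadar",
   "enemyRadar", "enemyMine", "goodRadarPlace", "goodMinePlace", "emptyGem"]

-- one iteration of A's inner loop: the elif ladder on pred (appended via Dict.modify)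
def pvStepA (d : PySem.Dict String (List String)) (pred0 : String) : PySem.Dict String (List String) :=
  let pred := PySem.Str.strip pred0
  if PySem.Str.startswith pred "row(" then d.modify "row" [] (· ++ [pred])
  else if PySem.Str.startswith pred "col(" then d.modify "col" [] (· ++ [pred])
  else if PySem.Str.startswith pred "cell" then d.modify "cell" [] (· ++ [pred])
  else if PySem.Str.startswith pred "action" then d.modify "action" [] (· ++ [pred])
  else if PySem.Str.startswith pred "item(" then d.modify "item" [] (· ++ [pred])
  else if PySem.Str.startswith pred "robot" then d.modify "robot" [] (· ++ [pred])
  else if PySem.Str.startswith pred "objectiveIs" then d.modify "objectiveIs" [] (· ++ [pred])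
  else if PySem.Str.startswith pred "costOfNextMove" then d.modify "costOfNextMove" [] (· ++ [pred])
  else if PySem.Str.startswith pred "teamColor" then d.modify "teamColor" [] (· ++ [pred])
  else if PySem.Str.startswith pred "objective(" then d.modify "objective" [] (· ++ [pred])
  else if PySem.Str.startswith pred "itemAvailable" then d.modify "itemAvailable" [] (· ++ [pred])
  else if PySem.Str.startswith pred "reachingCost" then d.modify "reachingCost" [] (· ++ [pred])
  else if PySem.Str.startswith pred "allyMine" then d.modify "allyMine" [] (· ++ [pred])
  else if PySem.Str.startswith pred "allyRadar" then d.modify "allyRadar" [] (· ++ [pred])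
  else if PySem.Str.startswith pred "enemyRadar" then d.modify "enemyRadar" [] (· ++ [pred])
  else if PySem.Str.startswith pred "enemyMine" then d.modify "enemyMine" [] (· ++ [pred])
  else if PySem.Str.startswith pred "goodRadarPlace" then d.modify "goodRadarPlace" [] (· ++ [pred])
  else if PySem.Str.startswith pred "goodMinePlace" then d.modify "goodMinePlace" [] (· ++ [pred])
  else if PySem.Str.startswith pred "emptyGem" then d.modify "emptyGem" [] (· ++ [pred])
  else d

def parse_input_string (input_string : String) : String :=
  let lines := (PySem.Str.split? input_string "\n").getD []
  let d := lines.foldl (fun d line =>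
    if PySem.Str.strip line ≠ "" then
      ((PySem.Str.split? line ". ").getD []).foldl pvStepA d
    else d) pvD0
  let sorted_output := pvKeys.foldl (fun acc key =>
    if d.getD key [] ≠ [] then acc ++ [PySem.Str.join ". " (d.getD key []) ++ "."] else acc)
    ([] : List String)
  let output_string := PySem.Str.join "\n" sorted_output ++ "\n"
  PySem.Str.replace output_string "..\n" ".\n"

-- ===== PORT B =====
def pvPrefixes : List String :=
  ["row(", "col(", "cell", "action", "item(", "robot", "objectiveIs", "costOfNextMove",
   "teamColor", "objective(", "itemAvailable", "reachingCost", "allyMine", "allyRadar",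
   "enemyRadar", "enemyMine", "goodRadarPlace", "goodMinePlace", "emptyGem"]

-- _classify: first index i with pred.startswith(PREFIXES[i]) (enumerate loop)
def pvClassifyGo (i : Nat) : List String → String → Option Nat
  | [], _ => none
  | pre :: rest, pred =>
      if PySem.Str.startswith pred pre then some i else pvClassifyGo (i + 1) rest pred

def pvClassify (pred : String) : Option Nat := pvClassifyGo 0 pvPrefixes pred

def parse_input_string_alt (input_string : String) : String :=
  let tagged := (((PySem.Str.split? input_string "\n").getD []).filter
      (fun line => PySem.Str.strip line != "")).flatMap
    (fun line => ((PySem.Str.split? line ". ").getD []).map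
      (fun p => (pvClassify (PySem.Str.strip p), PySem.Str.strip p)))
  let parts := (List.range pvPrefixes.length).foldl (fun acc i =>
    let group := (tagged.filter (fun t => t.1 == some i)).map (·.2)
    if group ≠ [] then acc ++ [PySem.Str.join ". " group ++ "."] else acc)
    ([] : List String)
  PySem.Str.replace (PySem.Str.join "\n" parts ++ "\n") "..\n" ".\n"

-- ===== PRECONDITION & SPEC =====
def Spec_parse_input_string (input_string : String) (out : String) : Prop := out = parse_input_string_alt input_string
instance (input_string : String) (out : String) : Decidable (Spec_parse_input_string input_string out) := by unfold Spec_parse_input_string; infer_instance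

-- ===== CLAIM (what is proved, stated in full; the proofs are below) =====
def Claim_equal_parse_input_string : Prop := ∀ (input_string : String), Dom_parse_input_string input_string → Spec_parse_input_string input_string (parse_input_string input_string)

-- ===== LEMMAS AND PROOFS =====

-- A's elif ladder = classify to an index, then append into the bucket of keys[i]
set_option maxHeartbeats 1000000 in
theorem pvStepA_eq_classify (d : PySem.Dict String (List String)) (p : String) :
    pvStepA d p =
      match pvClassify (PySem.Str.strip p) with
      | none => d
      | some i => d.modify (pvKeys.getD i "") [] (· ++ [PySem.Str.strip p]) := by
  simp only [pvStepA, pvClassify, pvPrefixes, pvClassifyGo]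
  by_cases h0 : PySem.Str.startswith (PySem.Str.strip p) "row(" = true
  · simp only [if_pos h0]; rfl
  simp only [if_neg h0]
  by_cases h1 : PySem.Str.startswith (PySem.Str.strip p) "col(" = true
  · simp only [if_pos h1]; rfl
  simp only [if_neg h1]
  by_cases h2 : PySem.Str.startswith (PySem.Str.strip p) "cell" = true
  · simp only [if_pos h2]; rfl
  simp only [if_neg h2]
  by_cases h3 : PySem.Str.startswith (PySem.Str.strip p) "action" = true
  · simp only [if_pos h3]; rfl
  simp only [if_neg h3]
  by_cases h4 : PySem.Str.startswith (PySem.Str.strip p) "item(" = true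
  · simp only [if_pos h4]; rfl
  simp only [if_neg h4]
  by_cases h5 : PySem.Str.startswith (PySem.Str.strip p) "robot" = true
  · simp only [if_pos h5]; rfl
  simp only [if_neg h5]
  by_cases h6 : PySem.Str.startswith (PySem.Str.strip p) "objectiveIs" = true
  · simp only [if_pos h6]; rfl
  simp only [if_neg h6]
  by_cases h7 : PySem.Str.startswith (PySem.Str.strip p) "costOfNextMove" = true
  · simp only [if_pos h7]; rfl
  simp only [if_neg h7]
  by_cases h8 : PySem.Str.startswith (PySem.Str.strip p) "teamColor" = true
  · simp only [if_pos h8]; rfl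
  simp only [if_neg h8]
  by_cases h9 : PySem.Str.startswith (PySem.Str.strip p) "objective(" = true
  · simp only [if_pos h9]; rfl
  simp only [if_neg h9]
  by_cases h10 : PySem.Str.startswith (PySem.Str.strip p) "itemAvailable" = true
  · simp only [if_pos h10]; rfl
  simp only [if_neg h10]
  by_cases h11 : PySem.Str.startswith (PySem.Str.strip p) "reachingCost" = true
  · simp only [if_pos h11]; rfl
  simp only [if_neg h11]
  by_cases h12 : PySem.Str.startswith (PySem.Str.strip p) "allyMine" = true
  · simp only [if_pos h12]; rfl
  simp only [if_neg h12]
  by_cases h13 : PySem.Str.startswith (PySem.Str.strip p) "allyRadar" = true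
  · simp only [if_pos h13]; rfl
  simp only [if_neg h13]
  by_cases h14 : PySem.Str.startswith (PySem.Str.strip p) "enemyRadar" = true
  · simp only [if_pos h14]; rfl
  simp only [if_neg h14]
  by_cases h15 : PySem.Str.startswith (PySem.Str.strip p) "enemyMine" = true
  · simp only [if_pos h15]; rfl
  simp only [if_neg h15]
  by_cases h16 : PySem.Str.startswith (PySem.Str.strip p) "goodRadarPlace" = true
  · simp only [if_pos h16]; rfl
  simp only [if_neg h16]
  by_cases h17 : PySem.Str.startswith (PySem.Str.strip p) "goodMinePlace" = true
  · simp only [if_pos h17]; rfl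
  simp only [if_neg h17]
  by_cases h18 : PySem.Str.startswith (PySem.Str.strip p) "emptyGem" = true
  · simp only [if_pos h18]; rfl
  simp only [if_neg h18]

-- the tagged pair list B would build, keyed by the dict key instead of the index
def pvTag (ps : List String) : List (String × String) :=
  ps.filterMap (fun p => (pvClassify (PySem.Str.strip p)).map
    (fun i => (pvKeys.getD i "", PySem.Str.strip p)))

theorem foldl_stepA_eq_modify (ps : List String) (d : PySem.Dict String (List String)) :
    ps.foldl pvStepA d = (pvTag ps).foldl (fun d q => d.modify q.1 [] (· ++ [q.2])) d := by
  induction ps generalizing d with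
  | nil => rfl
  | cons p ps ih =>
      simp only [pvTag, List.filterMap_cons] at ih ⊢
      rw [List.foldl_cons, pvStepA_eq_classify]
      cases h : pvClassify (PySem.Str.strip p) with
      | none => simp only [Option.map_none]; exact ih d
      | some i =>
          simp only [Option.map_some, List.foldl_cons]
          exact ih _

theorem pvClassifyGo_lt (l : List String) (i : Nat) (p : String) (j : Nat)
    (h : pvClassifyGo i l p = some j) : j < i + l.length := by
  induction l generalizing i with
  | nil => simp [pvClassifyGo] at h
  | cons pre rest ih =>
      simp only [pvClassifyGo] at h
      split_ifs at h with hc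
      · cases h; simp
      · have := ih (i + 1) h
        simp only [List.length_cons]
        omega

theorem pvClassify_lt (p : String) (j : Nat) (h : pvClassify p = some j) : j < 19 := by
  have := pvClassifyGo_lt pvPrefixes 0 p j h
  simpa [pvPrefixes] using this

theorem pvKeys_inj : ∀ i ∈ List.range 19, ∀ j ∈ List.range 19,
    (pvKeys.getD j "" = pvKeys.getD i "") ↔ j = i := by decide

-- bucket of keys[i] = group of tag i
theorem pvTag_filter_eq (ps : List String) (i : Nat) (hi : i < 19) :
    ((pvTag ps).filter (fun q => q.1 == pvKeys.getD i "")).map (·.2) =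
    ((ps.map (fun p => (pvClassify (PySem.Str.strip p), PySem.Str.strip p))).filter
        (fun t => t.1 == some i)).map (·.2) := by
  induction ps with
  | nil => rfl
  | cons p ps ih =>
      simp only [pvTag, List.filterMap_cons, List.map_cons] at ih ⊢
      cases h : pvClassify (PySem.Str.strip p) with
      | none =>
          simp only [Option.map_none, List.filter_cons]
          simpa using ih
      | some j =>
          have hj : j < 19 := pvClassify_lt _ _ h
          by_cases hij : j = i
          · subst hij
            simp only [Option.map_some, List.filter_cons, beq_self_eq_true, if_pos]
            simp only [List.map_cons]
            rw [ih]
          · have hne : (pvKeys.getD j "" == pvKeys.getD i "") = false := by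
              simp only [beq_eq_false_iff_ne, ne_eq]
              intro he
              exact hij ((pvKeys_inj i (by simpa using hi) j (by simpa using hj)).1 he)
            have hne2 : ((some j : Option Nat) == some i) = false := by
              simp [hij]
            simp only [Option.map_some, List.filter_cons, hne, hne2]
            simpa using ih

theorem pvD0_getD : ∀ i ∈ List.range 19, pvD0.getD (pvKeys.getD i "") [] = [] := by decide

theorem pvKeys_eq_map_range : pvKeys = (List.range 19).map (fun i => pvKeys.getD i "") := by decide

-- A's nested line/pred loops = one fold of pvStepA over the flattened pred list
theorem foldl_lines_eq_flat (lines : List String) (d : PySem.Dict String (List String)) :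
    lines.foldl (fun d line =>
        if PySem.Str.strip line ≠ "" then ((PySem.Str.split? line ". ").getD []).foldl pvStepA d else d) d =
    ((lines.filter (fun line => PySem.Str.strip line != "")).flatMap
        (fun line => (PySem.Str.split? line ". ").getD [])).foldl pvStepA d := by
  induction lines generalizing d with
  | nil => rfl
  | cons l ls ih =>
      simp only [List.foldl_cons, List.filter_cons]
      by_cases h : PySem.Str.strip l = ""
      · simp only [h] at ih ⊢
        simp only [ne_eq, not_true_eq_false, if_false, bne_self_eq_false, Bool.false_eq_true,
          if_false] at ih ⊢
        exact ih d
      · have hb : (PySem.Str.strip l != "") = true := by simp [h]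
        simp only [hb, if_true, ne_eq, h, not_false_eq_true, List.flatMap_cons,
          List.foldl_append, if_true] at ih ⊢
        exact ih _

-- ===== VERDICT (by name: the statement is the Claim_ definition above) =====
set_option maxHeartbeats 4000000 in
theorem parse_input_string_spec : Claim_equal_parse_input_string := by
  intro s _
  simp only [Spec_parse_input_string, parse_input_string, parse_input_string_alt]
  rw [foldl_lines_eq_flat, foldl_stepA_eq_modify]
  set ps := (((PySem.Str.split? s "\n").getD []).filter (fun line => PySem.Str.strip line != "")).flatMap
      (fun line => (PySem.Str.split? line ". ").getD []) with hps
  have htagged : (((PySem.Str.split? s "\n").getD []).filter (fun line => PySem.Str.strip line != "")).flatMap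
      (fun line => ((PySem.Str.split? line ". ").getD []).map
        (fun p => (pvClassify (PySem.Str.strip p), PySem.Str.strip p))) =
      ps.map (fun p => (pvClassify (PySem.Str.strip p), PySem.Str.strip p)) := by
    rw [hps, List.map_flatMap]
  rw [htagged]
  have hgetD : ∀ i ∈ List.range 19,
      ((pvTag ps).foldl (fun d q => d.modify q.1 [] (· ++ [q.2])) pvD0).getD (pvKeys.getD i "") [] =
      ((ps.map (fun p => (pvClassify (PySem.Str.strip p), PySem.Str.strip p))).filter
          (fun t => t.1 == some i)).map (·.2) := by
    intro i hi
    rw [PySem.Dict.getD_foldl_modify_append, pvD0_getD i hi,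
      pvTag_filter_eq ps i (by simpa using hi)]
    simp
  have hlen : pvPrefixes.length = 19 := by decide
  rw [hlen]
  congr 2
  rw [pvKeys_eq_map_range, List.foldl_map]
  refine congrArg (PySem.Str.join "\n") ?_
  refine PySem.List.foldl_congr_mem _ _ _ _ ?_
  intro acc i hi
  rw [hgetD i hi]
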